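-- pv_equiv track=rewrite | github.com/Noahz110/Project_Euler | pe72.py | product_primes
-- ===== SOURCE A (Python) =====
-- def product_primes(d):
--     primes = []
--     i = 2
--     while i*i <= d:
--         if d % i:
--             i += 1
--         else:
--             d //= i
--             if i not in primes:
--                 primes.append(i)
--     if d > 1 and d not in primes:
--         primes.append(d)
--     product , fractions_count = 1 , 1
--     for numb in primes:
--         product *= numb
--         fractions_count *= (numb-1)
--     return product , fractions_count
-- ===== SOURCE B (Python) =====
-- def product_primes(d):
--     # Recursive divide-and-conquer on the cofactor: find the smallest prime
--     # factor with a standalone search, strip all its copies, recurse on what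
--     # is left, and assemble both products on the way back up. No primes list,
--     # no membership test, no single sweeping trial index shared across primes.
--     def smallest_factor(n):
--         f = 2
--         while f * f <= n:
--             if n % f == 0:
--                 return f
--             f += 1
--         return n
--
--     if d <= 1:
--         return 1, 1
--     p = smallest_factor(d)
--     while d % p == 0:
--         d //= p
--     product, fractions_count = product_primes(d)
--     return p * product, (p - 1) * fractions_count
-- ===== Notes on version B (the rewrite author's own statement) =====
-- stated objective: alternative
-- what changed: B replaces A's single sweeping while-loop with a primes list and final fold by a recursion on the cofactor: a standalone smallest-prime-factor search (restarted from 2 at every level), complete stripping of that factor, a recursive call on the remainder, and both products assembled on return.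
import Mathlib
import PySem

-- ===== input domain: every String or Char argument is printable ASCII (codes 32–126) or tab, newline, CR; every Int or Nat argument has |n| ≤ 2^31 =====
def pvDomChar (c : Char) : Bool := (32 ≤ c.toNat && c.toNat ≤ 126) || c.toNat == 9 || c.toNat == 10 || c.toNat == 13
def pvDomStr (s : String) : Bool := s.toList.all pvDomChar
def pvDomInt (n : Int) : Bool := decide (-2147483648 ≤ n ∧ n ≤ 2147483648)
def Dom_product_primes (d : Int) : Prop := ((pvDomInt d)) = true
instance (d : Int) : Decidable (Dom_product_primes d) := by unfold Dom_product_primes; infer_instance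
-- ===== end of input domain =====

-- B replaces A's sweeping loop + primes list + final fold by a recursion on the cofactor:
-- a standalone smallest-factor search, complete stripping, recursion on the remainder,
-- products assembled on return (objective: alternative).
-- The Nat 'fuel' arguments are totality guards only: they are chosen large enough that
-- they never run out on the loops' reachable states.

-- ===== PORT A =====
-- A's while-loop: state (primes, i, d); one division per iteration, membership-guarded append.
def pvLoopA : Nat → List Int → Int → Int → List Int × Int
  | 0, primes, _, d => (primes, d)
  | fuel + 1, primes, i, d =>
    if i * i ≤ d then
      if PySem.Int.mod d i ≠ 0 then pvLoopA fuel primes (i + 1) d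
      else pvLoopA fuel (if i ∈ primes then primes else primes ++ [i]) i (PySem.Int.floordiv d i)
    else (primes, d)

def product_primes (d : Int) : Int × Int :=
  let r := pvLoopA (2 * d + 2).toNat [] 2 d
  let primes := if r.2 > 1 ∧ r.2 ∉ r.1 then r.1 ++ [r.2] else r.1
  (primes.foldl (fun a n => a * n) 1, primes.foldl (fun a n => a * (n - 1)) 1)

-- ===== PORT B =====
-- B's helper 'smallest_factor': scan f = 2, 3, … while f*f ≤ n; else return n.
def pvSF : Nat → Int → Int → Int
  | 0, _, n => n
  | fuel + 1, f, n =>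
    if f * f ≤ n then
      if PySem.Int.mod n f = 0 then f else pvSF fuel (f + 1) n
    else n

-- B's inner 'while d % p == 0: d //= p'.
def pvStrip : Nat → Int → Int → Int
  | 0, _, d => d
  | fuel + 1, i, d =>
    if PySem.Int.mod d i = 0 then pvStrip fuel i (PySem.Int.floordiv d i) else d

-- B's recursion: base case d ≤ 1, else smallest factor, strip, recurse, multiply.
def pvRec : Nat → Int → Int × Int
  | 0, _ => (1, 1)
  | fuel + 1, d =>
    if d ≤ 1 then (1, 1)
    else
      let p := pvSF d.toNat 2 d
      let d' := pvStrip d.toNat p d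
      let r := pvRec fuel d'
      (p * r.1, (p - 1) * r.2)

def product_primes_alt (d : Int) : Int × Int := pvRec d.toNat d

-- ===== PRECONDITION & SPEC =====
def Spec_product_primes (d : Int) (out : Int × Int) : Prop := out = product_primes_alt d
instance (d : Int) (out : Int × Int) : Decidable (Spec_product_primes d out) := by unfold Spec_product_primes; infer_instance

-- ===== CLAIM (what is proved, stated in full; the proofs are below) =====
def Claim_equal_product_primes : Prop := ∀ (d : Int), Dom_product_primes d → Spec_product_primes d (product_primes d)

-- ===== LEMMAS AND PROOFS =====

theorem pv_fdiv_lt (d i : Int) (h2 : 2 ≤ i) (hd : 0 < d) : PySem.Int.floordiv d i < d := by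
  rw [PySem.Int.floordiv_lt_iff_lt_mul (by omega)]
  nlinarith

theorem pv_fdiv_nonneg (d i : Int) (h2 : 2 ≤ i) (h : 0 ≤ d) : 0 ≤ PySem.Int.floordiv d i := by
  rw [PySem.Int.floordiv_eq_ediv_of_pos (by omega)]
  exact Int.ediv_nonneg h (by omega)

theorem pv_le_sq (i : Int) (h2 : 2 ≤ i) : i ≤ i * i := by nlinarith

theorem pv_sq_pos (d i : Int) (h2 : 2 ≤ i) (h : i * i ≤ d) : 0 < d := by nlinarith

theorem pv_dvd_of_mod (d i : Int) (h : PySem.Int.mod d i = 0) : i ∣ d :=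
  (PySem.Int.mod_eq_zero_iff_dvd d i).1 h

theorem pv_fdiv_mul (d i : Int) (h : PySem.Int.mod d i = 0) : PySem.Int.floordiv d i * i = d := by
  have := PySem.Int.floordiv_mul_add_mod d i
  omega

theorem pv_fdiv_pos (d i : Int) (h2 : 2 ≤ i) (hd : 0 < d) (h : PySem.Int.mod d i = 0) :
    0 < PySem.Int.floordiv d i := by
  have hm := pv_fdiv_mul d i h
  nlinarith [pv_fdiv_nonneg d i h2 (le_of_lt hd)]

theorem pv_two_fdiv_le (d i : Int) (h2 : 2 ≤ i) (hd : 0 < d) (h : PySem.Int.mod d i = 0) :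
    2 * PySem.Int.floordiv d i ≤ d := by
  have hm := pv_fdiv_mul d i h
  nlinarith [pv_fdiv_nonneg d i h2 (le_of_lt hd)]

theorem pv_fdiv_dvd (d i : Int) (h : PySem.Int.mod d i = 0) : PySem.Int.floordiv d i ∣ d :=
  ⟨i, (pv_fdiv_mul d i h).symm⟩

-- "d has no divisor in [2, i)"
def pvQ (i d : Int) : Prop := ∀ j : Int, 2 ≤ j → j < i → ¬ (j ∣ d)

-- Reference recursion: the pair (product of the distinct primes found from i on,
-- product of (p-1)), with 'already' recording whether i was already counted.
def pvG (i d : Int) (already : Bool) : Int × Int :=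
  if h : 2 ≤ i ∧ i * i ≤ d then
    if PySem.Int.mod d i ≠ 0 then pvG (i + 1) d false
    else
      let r := pvG i (PySem.Int.floordiv d i) true
      if already then r else (i * r.1, (i - 1) * r.2)
  else
    if d > 1 ∧ ¬(already = true ∧ d = i) then (d, d - 1) else (1, 1)
termination_by (d.toNat, (d + 2 - i).toNat)
decreasing_by
  · have := pv_le_sq i h.1
    exact Prod.Lex.right _ (by omega)
  · have hd := pv_sq_pos d i h.1 h.2
    have h1 := pv_fdiv_lt d i h.1 hd
    have h0 := pv_fdiv_nonneg d i h.1 (le_of_lt hd)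
    exact Prod.Lex.left _ _ (by omega)

def pvProdP (xs : List Int) : Int := xs.foldl (fun a n => a * n) 1
def pvProdM (xs : List Int) : Int := xs.foldl (fun a n => a * (n - 1)) 1

def pvFinishA (r : List Int × Int) : Int × Int :=
  let primes := if r.2 > 1 ∧ r.2 ∉ r.1 then r.1 ++ [r.2] else r.1
  (pvProdP primes, pvProdM primes)

theorem pvProdP_append (xs : List Int) (y : Int) : pvProdP (xs ++ [y]) = pvProdP xs * y := by
  simp [pvProdP]

theorem pvProdM_append (xs : List Int) (y : Int) : pvProdM (xs ++ [y]) = pvProdM xs * (y - 1) := by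
  simp [pvProdM]

theorem pvQ_fdiv (i d : Int) (hQ : pvQ i d) (h : PySem.Int.mod d i = 0) :
    pvQ i (PySem.Int.floordiv d i) := by
  intro j hj2 hji hjd
  exact hQ j hj2 hji (dvd_trans hjd (pv_fdiv_dvd d i h))

theorem pvQ_succ (i d : Int) (hQ : pvQ i d) (h : ¬ i ∣ d) : pvQ (i + 1) d := by
  intro j hj2 hji hjd
  rcases lt_or_eq_of_le (by omega : j ≤ i) with hlt | rfl
  · exact hQ j hj2 hlt hjd
  · exact h hjd

-- if d survives up to i, is positive, divisible by i and below i*i, then d = i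
theorem pv_residual_eq (i d : Int) (h2 : 2 ≤ i) (hd : 0 < d) (hQ : pvQ i d)
    (hdvd : i ∣ d) (hlt : d < i * i) : d = i := by
  obtain ⟨m, hm⟩ := hdvd
  have hm0 : 0 < m := by nlinarith
  have hmi : m < i := by nlinarith
  have : ¬ (2 ≤ m) := by
    intro h2m
    exact hQ m h2m hmi ⟨i, by rw [hm]; ring⟩
  have hm1 : m = 1 := by omega
  rw [hm1, mul_one] at hm
  exact hm

-- if d > 1 survives up to i then i ≤ d
theorem pv_i_le_residual (i d : Int) (hd : 1 < d) (hQ : pvQ i d) : i ≤ d := by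
  by_contra hc
  exact hQ d (by omega) (by omega) dvd_rfl

-- ===== full-stripping characterisation (fuel never runs out while d ≤ fuel) =====
theorem pvStrip_char (i : Int) (h2 : 2 ≤ i) :
    ∀ (fuel : Nat) (d : Int), 0 < d → d ≤ (fuel : Int) →
      pvStrip fuel i d ∣ d ∧ ¬ i ∣ pvStrip fuel i d ∧ 0 < pvStrip fuel i d ∧
        pvStrip fuel i d ≤ d := by
  intro fuel
  induction fuel with
  | zero => intro d hd hf; exfalso; simp at hf; omega
  | succ f ih =>
    intro d hd hf
    rw [pvStrip]
    by_cases hm : PySem.Int.mod d i = 0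
    · rw [if_pos hm]
      have hd' := pv_fdiv_pos d i h2 hd hm
      have hlt := pv_fdiv_lt d i h2 hd
      obtain ⟨hdvd, hnd, hpos, hle⟩ := ih (PySem.Int.floordiv d i) hd' (by push_cast at hf ⊢; omega)
      exact ⟨dvd_trans hdvd (pv_fdiv_dvd d i hm), hnd, hpos,
        le_trans hle (le_of_lt hlt)⟩
    · rw [if_neg hm]
      exact ⟨dvd_rfl, fun hc => hm ((PySem.Int.mod_eq_zero_iff_dvd d i).2 hc), hd, le_refl d⟩

theorem pvStrip_step (fuel : Nat) (i d : Int) (hm : PySem.Int.mod d i = 0) :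
    pvStrip (fuel + 1) i d = pvStrip fuel i (PySem.Int.floordiv d i) := by
  rw [pvStrip, if_pos hm]

theorem pvStrip_id (fuel : Nat) (i d : Int) (hm : ¬ i ∣ d) : pvStrip fuel i d = d := by
  cases fuel with
  | zero => rfl
  | succ f => rw [pvStrip, if_neg (fun hc => hm (pv_dvd_of_mod d i hc))]

-- the 'true' state of pvG equals moving on to i+1 with d fully stripped
theorem pvG_strip (i : Int) (h2 : 2 ≤ i) :
    ∀ (fuel : Nat) (d : Int), 0 < d → d ≤ (fuel : Int) → pvQ i d →
      pvG i d true = pvG (i + 1) (pvStrip fuel i d) false := by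
  intro fuel
  induction fuel with
  | zero => intro d hd hf; exfalso; simp at hf; omega
  | succ f ih =>
    intro d hd hf hQ
    by_cases hg : i * i ≤ d
    · by_cases hm : PySem.Int.mod d i = 0
      · have hd' := pv_fdiv_pos d i h2 hd hm
        have hlt := pv_fdiv_lt d i h2 hd
        have hQ' := pvQ_fdiv i d hQ hm
        rw [pvStrip_step f i d hm]
        have lhs : pvG i d true = pvG i (PySem.Int.floordiv d i) true := by
          rw [pvG, dif_pos ⟨h2, hg⟩, if_neg (by simpa using hm)]
          simp
        rw [lhs]
        exact ih (PySem.Int.floordiv d i) hd' (by push_cast at hf ⊢; omega) hQ'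
      · rw [pvStrip_id _ i d (fun hc => hm ((PySem.Int.mod_eq_zero_iff_dvd d i).2 hc))]
        rw [pvG, dif_pos ⟨h2, hg⟩, if_pos (by simpa using hm)]
    · push_neg at hg
      by_cases hdvd : i ∣ d
      · have hdi : d = i := pv_residual_eq i d h2 hd hQ hdvd hg
        rw [hdi]
        have hs1 : pvStrip (f + 1) i i = 1 := by
          rw [pvStrip_step f i i ((PySem.Int.mod_eq_zero_iff_dvd i i).2 dvd_rfl)]
          have hfd : PySem.Int.floordiv i i = 1 := by
            have := pv_fdiv_mul i i ((PySem.Int.mod_eq_zero_iff_dvd i i).2 dvd_rfl)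
            nlinarith
          rw [hfd]
          exact pvStrip_id f i 1 (by
            intro hc
            have := Int.le_of_dvd (by omega) hc
            omega)
        rw [hs1]
        rw [pvG, dif_neg (by intro hc; nlinarith [hc.2]), if_neg (by simp)]
        rw [pvG, dif_neg (by intro hc; nlinarith [hc.2]), if_neg (by omega)]
      · rw [pvStrip_id _ i d hdvd]
        rw [pvG, dif_neg (by intro hc; omega)]
        rw [pvG, dif_neg (by intro hc; nlinarith [hc.2])]
        have hdni : d ≠ i := by rintro rfl; exact hdvd dvd_rfl
        by_cases h1 : d > 1
        · rw [if_pos ⟨h1, by simp [hdni]⟩, if_pos ⟨h1, by simp⟩]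
        · rw [if_neg (by omega), if_neg (by omega)]

-- base cases: the loop guard fails, A takes its final branch
theorem pvLoopA_base (i d : Int) (primes : List Int) (already : Bool)
    (hd : 0 < d) (hQ : pvQ i d)
    (hinv : ∀ x ∈ primes, 2 ≤ x ∧ x ≤ i) (hmem : i ∈ primes ↔ already = true)
    (hg : ¬ i * i ≤ d) :
    pvFinishA (primes, d) =
      (pvProdP primes * (pvG i d already).1, pvProdM primes * (pvG i d already).2) := by
  rw [pvG, dif_neg (by intro hc; exact hg hc.2)]
  push_neg at hg
  have hmem_d : d ∈ primes ↔ (already = true ∧ d = i) := by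
    constructor
    · intro hin
      have hb := hinv d hin
      have : i ≤ d := pv_i_le_residual i d (by omega) hQ
      have hdi : d = i := by omega
      exact ⟨hmem.1 (hdi ▸ hin), hdi⟩
    · rintro ⟨ha, rfl⟩
      exact hmem.2 ha
  by_cases hc : d > 1 ∧ ¬(already = true ∧ d = i)
  · rw [if_pos hc]
    have hnot : d ∉ primes := fun hin => hc.2 (hmem_d.1 hin)
    simp only [pvFinishA]
    rw [if_pos ⟨hc.1, hnot⟩]
    rw [pvProdP_append, pvProdM_append]
  · rw [if_neg hc]
    simp only [pvFinishA]
    have : ¬ (d > 1 ∧ d ∉ primes) := by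
      intro ⟨h1, hnin⟩
      rcases not_and_or.1 hc with hb | hb
      · omega
      · push_neg at hb
        exact hnin (hmem_d.2 hb)
    rw [if_neg this]
    simp

-- ===== A-side characterisation =====
theorem pvLoopA_char :
    ∀ (fuel : Nat) (i d : Int) (primes : List Int) (already : Bool),
      2 ≤ i → 0 < d → 2 * d + 2 - i ≤ (fuel : Int) → pvQ i d →
      (∀ x ∈ primes, 2 ≤ x ∧ x ≤ i) → (i ∈ primes ↔ already = true) →
      pvFinishA (pvLoopA fuel primes i d) =
        (pvProdP primes * (pvG i d already).1, pvProdM primes * (pvG i d already).2) := by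
  intro fuel
  induction fuel with
  | zero =>
    intro i d primes already h2 hd hf hQ hinv hmem
    have hg : ¬ i * i ≤ d := by simp at hf; nlinarith
    exact pvLoopA_base i d primes already hd hQ hinv hmem hg
  | succ f ih =>
    intro i d primes already h2 hd hf hQ hinv hmem
    rw [pvLoopA]
    by_cases hg : i * i ≤ d
    · rw [if_pos hg, pvG, dif_pos ⟨h2, hg⟩]
      have hile : i ≤ d := le_trans (pv_le_sq i h2) hg
      by_cases hm : PySem.Int.mod d i ≠ 0
      · rw [if_pos hm, if_pos hm]
        exact ih (i + 1) d primes false (by omega) hd (by push_cast at hf ⊢; omega)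
          (pvQ_succ i d hQ (fun hc => hm ((PySem.Int.mod_eq_zero_iff_dvd d i).2 hc)))
          (fun x hx => ⟨(hinv x hx).1, by have := (hinv x hx).2; omega⟩)
          (by simp; intro hc; have := (hinv _ hc).2; omega)
      · rw [if_neg hm, if_neg hm]
        push_neg at hm
        have hd' := pv_fdiv_pos d i h2 hd hm
        have h2d' := pv_two_fdiv_le d i h2 hd hm
        have hf' : 2 * PySem.Int.floordiv d i + 2 - i ≤ (f : Int) := by
          push_cast at hf ⊢; omega
        have hQ' := pvQ_fdiv i d hQ hm
        cases already with
        | true =>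
          rw [if_pos (hmem.2 rfl)]
          have := ih i (PySem.Int.floordiv d i) primes true h2 hd' hf' hQ' hinv hmem
          simpa using this
        | false =>
          have hnotmem : i ∉ primes := fun hc => by simpa using hmem.1 hc
          rw [if_neg hnotmem]
          have := ih i (PySem.Int.floordiv d i) (primes ++ [i]) true h2 hd' hf' hQ'
            (by intro x hx; simp at hx; rcases hx with hx | rfl
                · exact hinv x hx
                · exact ⟨h2, le_refl _⟩)
            (by simp)
          rw [this, pvProdP_append, pvProdM_append]
          simp only [if_neg (by simp : ¬ (false = true)), Prod.mk.injEq]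
          exact ⟨by ring, by ring⟩
    · rw [if_neg hg]
      exact pvLoopA_base i d primes already hd hQ hinv hmem hg

-- ===== B-side: smallest-factor characterisation =====
theorem pv_pvQ_all (f n : Int) (h2 : 2 ≤ f) (hn : 1 < n) (hg : n < f * f) (hQ : pvQ f n) :
    pvQ n n := by
  intro j hj2 hjn hjd
  by_cases hjf : j < f
  · exact hQ j hj2 hjf hjd
  · push_neg at hjf
    obtain ⟨m, hm⟩ := hjd
    have hm0 : 0 < m := by nlinarith
    have hm2 : 2 ≤ m := by
      rcases (by omega : m = 1 ∨ 2 ≤ m) with rfl | h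
      · omega
      · exact h
    have hmf : m < f := by nlinarith
    exact hQ m hm2 hmf ⟨j, by rw [hm]; ring⟩

theorem pvSF_char :
    ∀ (fuel : Nat) (f n : Int), 2 ≤ f → 1 < n → pvQ f n → n + 1 - f ≤ (fuel : Int) →
      pvSF fuel f n ∣ n ∧ pvQ (pvSF fuel f n) n ∧ 2 ≤ pvSF fuel f n ∧
        (pvSF fuel f n * pvSF fuel f n ≤ n ∨ pvSF fuel f n = n) := by
  intro fuel
  induction fuel with
  | zero =>
    intro f n h2 hn hQ hf
    have hg : n < f * f := by simp at hf; nlinarith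
    exact ⟨dvd_rfl, pv_pvQ_all f n h2 hn hg hQ, by show (2 : Int) ≤ n; omega, Or.inr rfl⟩
  | succ fl ih =>
    intro f n h2 hn hQ hf
    rw [pvSF]
    by_cases hg : f * f ≤ n
    · rw [if_pos hg]
      by_cases hm : PySem.Int.mod n f = 0
      · rw [if_pos hm]
        exact ⟨pv_dvd_of_mod n f hm, hQ, h2, Or.inl hg⟩
      · rw [if_neg hm]
        exact ih (f + 1) n (by omega) hn
          (pvQ_succ f n hQ (fun hc => hm ((PySem.Int.mod_eq_zero_iff_dvd n f).2 hc)))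
          (by push_cast at hf ⊢; omega)
    · rw [if_neg hg]
      push_neg at hg
      exact ⟨dvd_rfl, pv_pvQ_all f n h2 hn hg hQ, by omega, Or.inr rfl⟩

-- ===== skipping non-divisors in pvG =====
theorem pvG_skip_one (j d : Int) (h2 : 2 ≤ j) (h : ¬ j ∣ d) :
    pvG j d false = pvG (j + 1) d false := by
  by_cases hg : j * j ≤ d
  · rw [pvG, dif_pos ⟨h2, hg⟩,
      if_pos (fun hc => h (pv_dvd_of_mod d j hc))]
  · push_neg at hg
    rw [pvG, dif_neg (by intro hc; omega)]
    rw [pvG, dif_neg (by intro hc; nlinarith [hc.2])]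
    have hdj : d ≠ j := by rintro rfl; exact h dvd_rfl
    by_cases h1 : d > 1
    · rw [if_pos ⟨h1, by simp⟩, if_pos ⟨h1, by simp⟩]
    · rw [if_neg (by omega), if_neg (by omega)]

theorem pvG_skip :
    ∀ (k : Nat) (j d : Int), 2 ≤ j → pvQ (j + (k : Int)) d →
      pvG j d false = pvG (j + (k : Int)) d false := by
  intro k
  induction k with
  | zero => intro j d _ _; norm_num
  | succ kk ih =>
    intro j d h2 hQ
    have hnd : ¬ j ∣ d := hQ j h2 (by push_cast; omega)
    rw [pvG_skip_one j d h2 hnd]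
    have heq : (j + 1) + (kk : Int) = j + ((kk + 1 : Nat) : Int) := by push_cast; ring
    rw [ih (j + 1) d (by omega) (by rw [heq]; exact hQ), heq]

theorem pvRec_one (fuel : Nat) : pvRec fuel 1 = (1, 1) := by
  cases fuel with
  | zero => rfl
  | succ f => rw [pvRec]; norm_num

-- ===== B-side characterisation =====
theorem pvRec_step_eq (fl : Nat) (d p S : Int) (h1 : 1 < d)
    (hp : pvSF d.toNat 2 d = p) (hS : pvStrip d.toNat p d = S) :
    pvRec (fl + 1) d = (p * (pvRec fl S).1, (p - 1) * (pvRec fl S).2) := by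
  simp only [pvRec]
  rw [if_neg (by omega : ¬ d ≤ 1), hp, hS]

theorem pvRec_char :
    ∀ (fuel : Nat) (d : Int), 0 < d → d ≤ (fuel : Int) → pvRec fuel d = pvG 2 d false := by
  intro fuel
  induction fuel with
  | zero => intro d hd hf; exfalso; simp at hf; omega
  | succ fl ih =>
    intro d hd hf
    by_cases h1 : d ≤ 1
    · have hd1 : d = 1 := by omega
      subst hd1
      rw [pvRec_one]
      rw [pvG, dif_neg (by intro hc; omega), if_neg (by omega)]
    · push_neg at h1
      have hQ2 : pvQ 2 d := by intro j hj2 hji; omega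
      have hfb : d + 1 - 2 ≤ ((d.toNat : Nat) : Int) := by omega
      obtain ⟨hpdvd, hpQ, hp2, hpor⟩ := pvSF_char d.toNat 2 d (by omega) h1 hQ2 hfb
      obtain ⟨p, hp⟩ : ∃ p, pvSF d.toNat 2 d = p := ⟨_, rfl⟩
      rw [hp] at hpdvd hpQ hp2 hpor
      have hskip : pvG 2 d false = pvG p d false := by
        have hh := pvG_skip (p - 2).toNat 2 d (by omega)
        have hc : (2 : Int) + (((p - 2).toNat : Nat) : Int) = p := by omega
        rw [hc] at hh
        exact hh hpQ
      have hm : PySem.Int.mod d p = 0 := (PySem.Int.mod_eq_zero_iff_dvd d p).2 hpdvd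
      obtain ⟨m, hmn⟩ : ∃ m : Nat, d.toNat = m + 1 := ⟨d.toNat - 1, by omega⟩
      rcases hpor with hpp | hpd
      · -- the smallest factor satisfies p * p ≤ d : pvG takes the division branch
        have hd' := pv_fdiv_pos d p hp2 hd hm
        have h2d' := pv_two_fdiv_le d p hp2 hd hm
        have hstep : pvStrip d.toNat p d = pvStrip m p (PySem.Int.floordiv d p) := by
          rw [hmn, pvStrip_step m p d hm]
        have hmf : PySem.Int.floordiv d p ≤ (m : Int) := by omega
        obtain ⟨hsdvd, hsnd, hspos, hsle⟩ :=
          pvStrip_char p hp2 m (PySem.Int.floordiv d p) hd' hmf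
        rw [← hstep] at hsdvd hsnd hspos hsle
        have hQd' : pvQ (p + 1) (pvStrip d.toNat p d) := by
          intro j hj2 hji hjd
          rcases lt_or_eq_of_le (by omega : j ≤ p) with hlt | rfl
          · exact hpQ j hj2 hlt (dvd_trans hjd (dvd_trans hsdvd (pv_fdiv_dvd d p hm)))
          · exact hsnd hjd
        have hGt : pvG p (PySem.Int.floordiv d p) true
            = pvG (p + 1) (pvStrip d.toNat p d) false := by
          rw [hstep]
          exact pvG_strip p hp2 m (PySem.Int.floordiv d p) hd' hmf (pvQ_fdiv p d hpQ hm)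
        have hskip2 : pvG 2 (pvStrip d.toNat p d) false
            = pvG (p + 1) (pvStrip d.toNat p d) false := by
          have hh := pvG_skip (p - 1).toNat 2 (pvStrip d.toNat p d) (by omega)
          have hc : (2 : Int) + (((p - 1).toNat : Nat) : Int) = p + 1 := by omega
          rw [hc] at hh
          exact hh hQd'
        have hih : pvRec fl (pvStrip d.toNat p d) = pvG 2 (pvStrip d.toNat p d) false := by
          apply ih _ hspos
          have h2S : 2 * pvStrip d.toNat p d ≤ d := le_trans (by omega) h2d'
          omega
        have hG : pvG p d false
            = (p * (pvG 2 (pvStrip d.toNat p d) false).1,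
               (p - 1) * (pvG 2 (pvStrip d.toNat p d) false).2) := by
          rw [pvG, dif_pos ⟨hp2, hpp⟩, if_neg (by simpa using hm)]
          simp [hGt, hskip2]
        rw [pvRec_step_eq fl d p (pvStrip d.toNat p d) h1 hp rfl, hih, hskip, hG]
      · -- no factor up to the square root: pvSF returned d itself, stripping leaves 1
        have hs1 : pvStrip d.toNat p d = 1 := by
          rw [hpd, hmn, pvStrip_step m d d ((PySem.Int.mod_eq_zero_iff_dvd d d).2 dvd_rfl)]
          have hfd : PySem.Int.floordiv d d = 1 := by
            have := pv_fdiv_mul d d ((PySem.Int.mod_eq_zero_iff_dvd d d).2 dvd_rfl)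
            nlinarith
          rw [hfd]
          exact pvStrip_id m d 1 (by
            intro hc
            have := Int.le_of_dvd (by omega) hc
            omega)
        rw [pvRec_step_eq fl d p (pvStrip d.toNat p d) h1 hp rfl, hs1, pvRec_one, hskip, hpd]
        rw [pvG, dif_neg (by intro hc; nlinarith [hc.2]), if_pos ⟨h1, by simp⟩]
        simp

-- assembling the two ports
theorem pvA_eq_finish (d : Int) : product_primes d = pvFinishA (pvLoopA (2 * d + 2).toNat [] 2 d) := rfl

theorem pvLoopA_stuck (fuel : Nat) (primes : List Int) (i d : Int) (hg : ¬ i * i ≤ d) :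
    pvLoopA fuel primes i d = (primes, d) := by
  cases fuel with
  | zero => rfl
  | succ f => rw [pvLoopA, if_neg hg]

-- ===== VERDICT (by name: the statement is the Claim_ definition above) =====
theorem product_primes_spec : Claim_equal_product_primes := by
  intro d _
  unfold Spec_product_primes
  by_cases hpos : 0 < d
  case neg =>
    rw [pvA_eq_finish]
    rw [pvLoopA_stuck _ _ _ _ (by omega)]
    have hz : d.toNat = 0 := by omega
    simp [product_primes_alt, hz, pvRec, pvFinishA, pvProdP, pvProdM, (show ¬ d > 1 by omega)]
  case pos =>
    have hQ : pvQ 2 d := by intro j hj2 hji; omega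
    rw [pvA_eq_finish]
    rw [pvLoopA_char (2 * d + 2).toNat 2 d [] false (by omega) hpos (by push_cast; omega) hQ
      (by simp) (by simp)]
    rw [show product_primes_alt d = pvRec d.toNat d from rfl,
      pvRec_char d.toNat d hpos (by omega)]
    simp [pvProdP, pvProdM]
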